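-- pv_equiv track=rewrite | github.com/cbarton281/welcomepage-api | api/spotify.py | _extract_type_and_id
-- ===== SOURCE A (Python) =====
-- def _extract_type_and_id(url: str):
--     """
--     Supports URLs like:
--     - https://open.spotify.com/playlist/{id}
--     - https://open.spotify.com/show/{id}
--     - https://open.spotify.com/track/{id}
--     Also supports regional subpaths or query params.
--     Returns (api_type, id) where api_type in ['playlists', 'shows', 'tracks']
--     """
--     try:
--         # Normalize
--         if 'spotify.com' not in url:
--             return None, None
--         # Split by '/'
--         parts = url.split('?')[0].split('#')[0].strip('/').split('/')
--         # Find indices for 'playlist' | 'show' | 'track'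
--         api_map = {
--             'playlist': 'playlists',
--             'show': 'shows',
--             'track': 'tracks',
--         }
--         for i, p in enumerate(parts):
--             if p in api_map and i + 1 < len(parts):
--                 return api_map[p], parts[i + 1]
--         return None, None
--     except Exception:
--         return None, None
-- ===== SOURCE B (Python) =====
-- def _find_segment(s, kw):
--     """First index where kw occupies a whole path segment of s (kw followed by
--     '/', preceded by start-of-string or '/'), or -1."""
--     pat = kw + '/'
--     j = s.find(pat)
--     while j >= 0:
--         if j == 0 or s[j - 1] == '/':
--             return j
--         j = s.find(pat, j + 1)
--     return -1
--
--
-- def _extract_type_and_id(url: str):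
--     if 'spotify.com' not in url:
--         return None, None
--     s = url.split('?')[0].split('#')[0].strip('/')
--     best = -1
--     api = None
--     idstart = 0
--     for kw, name in (('playlist', 'playlists'), ('show', 'shows'), ('track', 'tracks')):
--         j = _find_segment(s, kw)
--         if j >= 0 and (best < 0 or j < best):
--             best, api, idstart = j, name, j + len(kw) + 1
--     if api is None:
--         return None, None
--     end = s.find('/', idstart)
--     ident = s[idstart:] if end < 0 else s[idstart:end]
--     return api, ident
-- ===== Notes on version B (the rewrite author's own statement) =====
-- stated objective: alternative
-- what changed: Instead of splitting the path into segments and scanning them with enumerate against a dict, B searches the uncut string directly: for each keyword it finds via str.find the first occurrence of 'kw/' sitting on a segment boundary, takes the leftmost hit across the three keywords, and slices the id out of the string up to the next '/'.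
import Mathlib
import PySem

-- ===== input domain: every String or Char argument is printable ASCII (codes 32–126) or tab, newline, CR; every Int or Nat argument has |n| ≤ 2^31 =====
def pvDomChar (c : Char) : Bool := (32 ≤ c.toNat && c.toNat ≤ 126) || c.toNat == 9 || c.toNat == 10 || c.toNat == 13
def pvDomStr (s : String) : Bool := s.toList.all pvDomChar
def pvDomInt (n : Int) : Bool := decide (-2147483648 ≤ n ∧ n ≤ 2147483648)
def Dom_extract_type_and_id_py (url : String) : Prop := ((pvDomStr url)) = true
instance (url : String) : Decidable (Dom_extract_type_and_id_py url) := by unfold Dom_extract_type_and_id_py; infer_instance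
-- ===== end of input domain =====

-- B locates the keyword by direct substring search ('kw/' at a segment boundary, leftmost
-- across the three keywords) and slices the id out of the uncut string, instead of A's
-- split-into-segments + enumerate scan against a dict: alternative algorithm, same value.


-- ===== PORT A =====
-- api_map = {'playlist': 'playlists', 'show': 'shows', 'track': 'tracks'}  (keys/values as char lists)
def pvApiMap : PySem.Dict (List Char) (List Char) :=
  PySem.Dict.mk [("playlist".toList, "playlists".toList),
                 ("show".toList, "shows".toList),
                 ("track".toList, "tracks".toList)]

-- the 'for i, p in enumerate(parts): …' loop of A
def pvAScan (parts : List (List Char)) : List (Int × List Char) → Option String × Option String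
  | [] => (none, none)
  | (i, p) :: rest =>
    if (PySem.Dict.get? pvApiMap p).isSome ∧ i + 1 < (parts.length : Int) then
      ((PySem.Dict.get? pvApiMap p).map String.ofList,
       (PySem.List.pyGet? parts (i + 1)).map String.ofList)
    else pvAScan parts rest

-- string operations ported on the List Char side (PySem.Chars is the exact model of str methods)
def extract_type_and_id_py (url : String) : Option String × Option String :=
  if PySem.Str.isIn "spotify.com" url = false then (none, none)
  else
    let s1 := (PySem.Chars.splitOn url.toList ['?']).headD []      -- url.split('?')[0] (split is never empty)
    let s2 := (PySem.Chars.splitOn s1 ['#']).headD []              -- .split('#')[0]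
    let parts := PySem.Chars.splitOn (PySem.Chars.stripChars s2 ['/']) ['/']   -- .strip('/').split('/')
    pvAScan parts (PySem.List.enumerate parts 0)

-- ===== PORT B =====
-- _find_segment's while loop as its structural recursion.  s.find(pat, start) is
-- PySem.Chars.findFrom (exact).  The extra 'start ≤ s.length' in the guard only makes the
-- recursion total: when start > len(s), Python's find returns -1 and the loop exits with -1,
-- which is what the guard's else branch returns.
def pvFindSeg (s pat : List Char) (start : Nat) : Int :=
  let j := PySem.Chars.findFrom s pat (start : Int) none
  if h : 0 ≤ j ∧ start ≤ s.length then
    if j = 0 ∨ s[j.toNat - 1]? = some '/' then j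
    else pvFindSeg s pat (j.toNat + 1)
  else -1
termination_by s.length + 1 - start
decreasing_by
  have hspec := PySem.Chars.findFrom_natCast_spec s pat start h.2 (by omega)
  omega

-- the tuple list of Source B's for loop
def pvPairs : List (List Char × List Char) :=
  [("playlist".toList, "playlists".toList),
   ("show".toList, "shows".toList),
   ("track".toList, "tracks".toList)]

-- one iteration of 'for kw, name in …' updating (best, api, idstart)
def pvBUpd (s : List Char) (st : Int × Option (List Char) × Int) (p : List Char × List Char) :
    Int × Option (List Char) × Int :=
  let j := pvFindSeg s (p.1 ++ ['/']) 0
  if 0 ≤ j ∧ (st.1 < 0 ∨ j < st.1) then (j, some p.2, j + (p.1.length : Int) + 1) else st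

def extract_type_and_id_py_alt (url : String) : Option String × Option String :=
  if PySem.Str.isIn "spotify.com" url = false then (none, none)
  else
    let s1 := (PySem.Chars.splitOn url.toList ['?']).headD []      -- url.split('?')[0]
    let s2 := (PySem.Chars.splitOn s1 ['#']).headD []              -- .split('#')[0]
    let s := PySem.Chars.stripChars s2 ['/']                       -- .strip('/')
    let st := pvPairs.foldl (pvBUpd s) (-1, none, 0)
    match st.2.1 with
    | none => (none, none)
    | some api =>
      let e := PySem.Chars.findFrom s ['/'] st.2.2 none            -- s.find('/', idstart)
      let ident := if e < 0 then PySem.List.slice s (some st.2.2) none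
                   else PySem.List.slice s (some st.2.2) (some e)  -- s[idstart:] / s[idstart:end]
      (some (String.ofList api), some (String.ofList ident))

-- ===== PRECONDITION & SPEC =====
def Spec_extract_type_and_id_py (url : String) (out : Option String × Option String) : Prop := out = extract_type_and_id_py_alt url
instance (url : String) (out : Option String × Option String) : Decidable (Spec_extract_type_and_id_py url out) := by unfold Spec_extract_type_and_id_py; infer_instance

-- ===== CLAIM (what is proved, stated in full; the proofs are below) =====
def Claim_equal_extract_type_and_id_py : Prop := ∀ (url : String), Dom_extract_type_and_id_py url → Spec_extract_type_and_id_py url (extract_type_and_id_py url)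

-- ===== LEMMAS AND PROOFS =====

-- ---------- A-side bridge: the enumerate scan is a pairwise walk over the segments ----------

def pvKind : List Char → Option (List Char)
  | seg =>
    if seg = "playlist".toList then some "playlists".toList
    else if seg = "show".toList then some "shows".toList
    else if seg = "track".toList then some "tracks".toList
    else none

def pvBScan : List (List Char) → Option String × Option String
  | p :: q :: rest =>
    match pvKind p with
    | some v => (some (String.ofList v), some (String.ofList q))
    | none => pvBScan (q :: rest)
  | _ => (none, none)

lemma pv_get_eq_kind (p : List Char) : PySem.Dict.get? pvApiMap p = pvKind p := by
  by_cases h1 : p = "playlist".toList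
  · subst h1; decide
  by_cases h2 : p = "show".toList
  · subst h2; decide
  by_cases h3 : p = "track".toList
  · subst h3; decide
  have n1 : ¬ p = ['p','l','a','y','l','i','s','t'] := h1
  have n2 : ¬ p = ['s','h','o','w'] := h2
  have n3 : ¬ p = ['t','r','a','c','k'] := h3
  have b1 : (['p','l','a','y','l','i','s','t'] == p) = false := by
    rw [beq_eq_false_iff_ne]; exact fun e => n1 e.symm
  have b2 : (['s','h','o','w'] == p) = false := by
    rw [beq_eq_false_iff_ne]; exact fun e => n2 e.symm
  have b3 : (['t','r','a','c','k'] == p) = false := by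
    rw [beq_eq_false_iff_ne]; exact fun e => n3 e.symm
  simp [pvApiMap, PySem.Dict.get?, pvKind, List.find?, b1, b2, b3, n1, n2, n3]

lemma pv_scan_eq (parts : List (List Char)) :
    ∀ (l : List (List Char)) (k : Nat), parts.drop k = l →
      pvAScan parts (PySem.List.enumerate l k) = pvBScan l := by
  intro l
  induction l with
  | nil => intro k _; simp [PySem.List.enumerate, pvAScan, pvBScan]
  | cons p rest ih =>
    intro k hk
    have hklt : k < parts.length := by
      by_contra hge
      simp [List.drop_eq_nil_of_le (Nat.le_of_not_lt hge)] at hk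
    have hdrop1 : parts.drop (k + 1) = rest := by
      rw [← List.tail_drop, hk]; rfl
    rw [PySem.List.enumerate_cons]
    rw [pvAScan]
    rw [pv_get_eq_kind]
    cases hkind : pvKind p with
    | none =>
      rw [if_neg (by simp)]
      have := ih (k + 1) hdrop1
      rw [show ((k : Int) + 1) = ((k + 1 : Nat) : Int) by push_cast; ring, this]
      cases rest with
      | nil => simp [pvBScan]
      | cons q r => simp [pvBScan, hkind]
    | some v =>
      cases rest with
      | nil =>
        have hlen : parts.length = k + 1 := by
          have := congrArg List.length hk
          simp at this; omega
        rw [if_neg (by simp [hlen])]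
        have := ih (k + 1) hdrop1
        simpa [PySem.List.enumerate, pvBScan] using this
      | cons q r =>
        have hlt : k + 1 < parts.length := by
          have := congrArg List.length hk
          simp at this; omega
        rw [if_pos ⟨by simp, by exact_mod_cast hlt⟩]
        have hget : PySem.List.pyGet? parts ((k : Int) + 1) = some q := by
          rw [show ((k : Int) + 1) = ((k + 1 : Nat) : Int) by push_cast; ring]
          rw [PySem.List.pyGet?_natCast]
          have : parts[k + 1]? = (parts.drop (k + 1))[0]? := by
            rw [List.getElem?_drop]
          rw [this, hdrop1]
          rfl
        simp [pvBScan, hkind, hget]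

-- ---------- splitOn on a single-char separator, as a structural recursion ----------

def pvSplit : List Char → List (List Char)
  | [] => [[]]
  | c :: r =>
    if c = '/' then [] :: pvSplit r
    else List.modifyHead (c :: ·) (pvSplit r)

lemma pvSplit_ne_nil (l : List Char) : pvSplit l ≠ [] := by
  induction l with
  | nil => simp [pvSplit]
  | cons c r ih =>
    rw [pvSplit]
    split
    · simp
    · cases h : pvSplit r with
      | nil => exact absurd h ih
      | cons a b => simp

lemma pv_go_acc (c : Char) (fuel : Nat) (l cur : List Char) (acc : List (List Char)) :
    PySem.Chars.splitOn.go [c] fuel l cur acc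
      = acc.reverse ++ PySem.Chars.splitOn.go [c] fuel l cur [] := by
  induction fuel generalizing l cur acc with
  | zero => simp [PySem.Chars.splitOn.go]
  | succ n ih =>
    cases l with
    | nil => simp [PySem.Chars.splitOn.go]
    | cons c' rest =>
      rw [PySem.Chars.splitOn.go.eq_def, PySem.Chars.splitOn.go.eq_def]
      simp only
      split
      · rw [ih _ _ (cur.reverse :: acc), ih _ _ [cur.reverse]]
        simp
      · exact ih _ _ _

lemma pv_go_eq (fuel : Nat) (l cur : List Char) (h : l.length ≤ fuel) :
    PySem.Chars.splitOn.go ['/'] fuel l cur []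
      = List.modifyHead (cur.reverse ++ ·) (pvSplit l) := by
  induction fuel generalizing l cur with
  | zero =>
    have : l = [] := by cases l <;> simp_all
    subst this
    simp [PySem.Chars.splitOn.go, pvSplit]
  | succ n ih =>
    cases l with
    | nil => simp [PySem.Chars.splitOn.go, pvSplit]
    | cons c rest =>
      rw [PySem.Chars.splitOn.go.eq_def]
      simp only
      by_cases hc : c = '/'
      · subst hc
        rw [if_pos (by simp [List.isPrefixOf])]
        rw [pv_go_acc]
        rw [ih _ _ (by simpa using Nat.le_of_succ_le_succ (by simpa using h))]
        rw [pvSplit]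
        rw [if_pos rfl]
        cases hsp : pvSplit rest with
        | nil => exact absurd hsp (pvSplit_ne_nil rest)
        | cons a b => simp [List.modifyHead, hsp]
      · rw [if_neg (by simp [List.isPrefixOf]; exact fun hh => hc hh.symm)]
        rw [ih _ _ (by simpa using Nat.le_of_succ_le_succ (by simpa using h))]
        rw [pvSplit]
        rw [if_neg hc]
        cases hsp : pvSplit rest with
        | nil => exact absurd hsp (pvSplit_ne_nil rest)
        | cons a b => simp [List.modifyHead]

lemma pv_splitOn_eq (l : List Char) : PySem.Chars.splitOn l ['/'] = pvSplit l := by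
  unfold PySem.Chars.splitOn
  rw [pv_go_eq _ _ _ (by omega)]
  cases h : pvSplit l with
  | nil => exact absurd h (pvSplit_ne_nil l)
  | cons a b => simp [List.modifyHead]

lemma pvSplit_head (l : List Char) :
    (pvSplit l).headD [] = l.takeWhile (· != '/') := by
  induction l with
  | nil => simp [pvSplit]
  | cons c r ih =>
    rw [pvSplit]
    by_cases hc : c = '/'
    · subst hc; simp [List.takeWhile]
    · rw [if_neg hc]
      cases hsp : pvSplit r with
      | nil => exact absurd hsp (pvSplit_ne_nil r)
      | cons a b =>
        have hbne : (c != '/') = true := by simpa [bne] using hc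
        simp [List.modifyHead, List.takeWhile, hbne]
        rw [← ih, hsp]
        rfl

lemma pvSplit_no_slash (l : List Char) (h : '/' ∉ l) : pvSplit l = [l] := by
  induction l with
  | nil => simp [pvSplit]
  | cons c r ih =>
    rw [pvSplit]
    rw [if_neg (by intro hc; exact h (by simp [hc]))]
    rw [ih (by intro hm; exact h (by simp [hm]))]
    rfl

lemma pvSplit_append (seg t : List Char) (h : '/' ∉ seg) :
    pvSplit (seg ++ '/' :: t) = seg :: pvSplit t := by
  induction seg with
  | nil => simp [pvSplit]
  | cons c r ih =>
    have hc : c ≠ '/' := by intro hc; exact h (by simp [hc])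
    rw [List.cons_append, pvSplit, if_neg hc,
        ih (by intro hm; exact h (by simp [hm]))]
    rfl

-- ---------- facts about findFrom / pvFindSeg ----------

lemma pv_findFrom_ge (s sub : List Char) (k : Nat) :
    -1 ≤ PySem.Chars.findFrom s sub (k : Int) none := by
  unfold PySem.Chars.findFrom
  simp only
  split_ifs with h1 h2 <;> try omega
  have := PySem.Chars.neg_one_le_find (List.drop (((k:Int)).toNat) (List.take ((s.length:Int).toNat) s)) sub
  omega

lemma pvFindSeg_spec (s pat : List Char) (start : Nat)
    (h : 0 ≤ pvFindSeg s pat start) :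
    pat <+: s.drop (pvFindSeg s pat start).toNat := by
  fun_induction pvFindSeg with
  | case1 start j hg hb =>
    have hspec := PySem.Chars.findFrom_natCast_spec s pat start hg.2 (by omega)
    simpa using hspec.2.1
  | case2 start j hg hb ih => simpa using ih (by simpa using h)
  | case3 start j hg => omega

lemma pv_findFromEq (s sub : List Char) (k d : Nat) (hk : k ≤ s.length) (hkd : k ≤ d)
    (hocc : sub <+: s.drop d) (hmin : ∀ i, k ≤ i → i < d → ¬ sub <+: s.drop i) :
    PySem.Chars.findFrom s sub (k : Int) none = (d : Int) := by
  rw [PySem.Chars.findFrom_natCast s sub k hk]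
  have hinf : sub <:+: s.drop k := by
    have : sub <+: (s.drop k).drop (d - k) := by
      rw [List.drop_drop]
      rwa [show k + (d - k) = d by omega]
    exact (this.isInfix).trans (List.drop_suffix _ _).isInfix
  have hnn : 0 ≤ PySem.Chars.find (s.drop k) sub := (PySem.Chars.find_nonneg_iff _ _).mpr hinf
  have hspec := PySem.Chars.find_spec hnn
  set d0 := (PySem.Chars.find (s.drop k) sub).toNat with hd0
  have h1 : sub <+: s.drop (k + d0) := by
    have := hspec.1
    rwa [List.drop_drop] at this
  have h2 : ∀ i < d0, ¬ sub <+: s.drop (k + i) := by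
    intro i hi hcon
    exact hspec.2 i hi (by rwa [List.drop_drop])
  have hle : k + d0 ≤ d := by
    by_contra hlt
    exact h2 (d - k) (by omega) (by rwa [show k + (d - k) = d by omega])
  have hge : ¬ (k + d0 < d) := fun hlt => hmin (k + d0) (by omega) hlt h1
  rw [if_neg (by omega)]
  omega

lemma pv_skip (s pat : List Char) (start : Nat) (hs : start ≤ s.length)
    (hinv : ¬ (pat <+: s.drop start ∧ (start = 0 ∨ s[start - 1]? = some '/'))) :
    pvFindSeg s pat start = pvFindSeg s pat (start + 1) := by
  rw [pvFindSeg]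
  set j := PySem.Chars.findFrom s pat (start : Int) none with hj
  by_cases hjn : 0 ≤ j
  · have hne : j ≠ -1 := by omega
    have hspec := PySem.Chars.findFrom_natCast_spec s pat start hs hne
    rw [dif_pos ⟨hjn, hs⟩]
    by_cases hstart : j.toNat = start
    · have hocc : pat <+: List.drop start s := by rw [← hstart]; exact hspec.2.1
      have hbnd : ¬ (j = 0 ∨ s[j.toNat - 1]? = some '/') := by
        intro hb
        apply hinv
        refine ⟨hocc, ?_⟩
        rcases hb with hb | hb
        · left; omega
        · right; rwa [hstart] at hb
      rw [if_neg hbnd, hstart]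
    · have hgt : start < j.toNat := by
        have := hspec.1; omega
      have hb : j.toNat ≤ s.length := by
        by_contra hbig
        have hnil : pat <+: ([] : List Char) := by
          have := hspec.2.1
          rwa [List.drop_eq_nil_of_le (by omega)] at this
        have hpat : pat = [] := List.prefix_nil.mp hnil
        exact hspec.2.2 start (le_refl _) hgt (hpat ▸ List.nil_prefix)
      have hre : PySem.Chars.findFrom s pat ((start + 1 : Nat) : Int) none = ((j.toNat : Nat) : Int) :=
        pv_findFromEq s pat (start + 1) j.toNat (by omega) (by omega) hspec.2.1
          (fun i hi1 hi2 => hspec.2.2 i (by omega) hi2)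
      have hjj : ((j.toNat : Nat) : Int) = j := Int.toNat_of_nonneg hjn
      conv_rhs => rw [pvFindSeg]
      rw [hre, hjj]
      rw [dif_pos ⟨hjn, by omega⟩]
  · have hjeq : j = -1 := by
      have := pv_findFrom_ge s pat start
      omega
    rw [dif_neg (by omega)]
    conv_rhs => rw [pvFindSeg]
    by_cases hl : start + 1 ≤ s.length
    · have hnin : ¬ pat <:+: s.drop start := by
        rw [← PySem.Chars.findFrom_natCast_eq_neg_one_iff s pat start hs]
        exact hjeq
      have : PySem.Chars.findFrom s pat ((start + 1 : Nat) : Int) none = -1 := by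
        rw [PySem.Chars.findFrom_natCast_eq_neg_one_iff s pat (start + 1) hl]
        intro hinf
        apply hnin
        have hsfx : s.drop (start + 1) <:+ s.drop start := by
          have := List.drop_suffix 1 (s.drop start)
          rwa [List.drop_drop] at this
        exact hinf.trans hsfx.isInfix
      rw [this]
      rw [dif_neg (by omega)]
    · rw [dif_neg (by omega)]

lemma pv_pb_aux (kw : List Char) : ∀ (seg t : List Char), '/' ∉ kw → '/' ∉ seg →
    (kw ++ ['/']) <+: (seg ++ '/' :: t) → kw = seg := by
  induction kw with
  | nil =>
    intro seg t _ hseg h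
    cases seg with
    | nil => rfl
    | cons a r =>
      simp only [List.nil_append, List.cons_append, List.cons_prefix_cons] at h
      exact (hseg (by simp [← h.1])).elim
  | cons c cr ih =>
    intro seg t hkw hseg h
    cases seg with
    | nil =>
      simp only [List.cons_append, List.nil_append, List.cons_prefix_cons] at h
      exact (hkw (by simp [h.1])).elim
    | cons a r =>
      simp only [List.cons_append, List.cons_prefix_cons] at h
      have := ih r t (fun hm => hkw (List.mem_cons_of_mem _ hm))
        (fun hm => hseg (List.mem_cons_of_mem _ hm)) h.2
      rw [h.1, this]

lemma pv_prefix_boundary (kw seg t : List Char) (hkw : '/' ∉ kw) (hseg : '/' ∉ seg) :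
    (kw ++ ['/']) <+: (seg ++ '/' :: t) ↔ kw = seg := by
  constructor
  · exact pv_pb_aux kw seg t hkw hseg
  · rintro rfl
    exact ⟨t, by simp⟩

lemma pv_noslash (s pat : List Char) (hp : '/' ∈ pat) (hs : '/' ∉ s) :
    pvFindSeg s pat 0 = -1 := by
  rw [pvFindSeg]
  have h0 : PySem.Chars.findFrom s pat ((0 : Nat) : Int) none = -1 := by
    rw [PySem.Chars.findFrom_natCast_eq_neg_one_iff s pat 0 (by omega)]
    intro hinf
    rw [List.drop_zero] at hinf
    exact hs (hinf.subset hp)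
  rw [h0]
  rw [dif_neg (by omega)]

lemma pv_K1 (kw t : List Char) :
    pvFindSeg (kw ++ '/' :: t) (kw ++ ['/']) 0 = 0 := by
  rw [pvFindSeg]
  have h0 : PySem.Chars.findFrom (kw ++ '/' :: t) (kw ++ ['/']) ((0 : Nat) : Int) none
      = ((0 : Nat) : Int) :=
    pv_findFromEq _ _ 0 0 (by omega) (le_refl 0)
      (by rw [List.drop_zero]; exact ⟨t, by simp⟩) (by omega)
  rw [h0]
  rw [dif_pos ⟨by omega, by omega⟩]
  rw [if_pos (Or.inl (by omega))]
  simp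

lemma pv_drop_shift (seg t : List Char) (i : Nat) :
    (seg ++ '/' :: t).drop (seg.length + 1 + i) = t.drop i := by
  have h1 : seg ++ '/' :: t = (seg ++ ['/']) ++ t := by simp
  rw [h1, show seg.length + 1 + i = (seg ++ ['/']).length + i by simp]
  rw [List.drop_append]
  simp

lemma pv_drop_shift0 (seg t : List Char) :
    (seg ++ '/' :: t).drop (seg.length + 1) = t := by
  have h := pv_drop_shift seg t 0
  simp only [Nat.add_zero, List.drop_zero] at h
  exact h

lemma pv_getElem_shift (seg t : List Char) (i : Nat) :
    (seg ++ '/' :: t)[seg.length + 1 + i]? = t[i]? := by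
  rw [← List.getElem?_drop, pv_drop_shift0]

lemma pv_shift (seg t pat : List Char) (hpat : pat ≠ []) :
    ∀ (start' : Nat),
      pvFindSeg (seg ++ '/' :: t) pat (seg.length + 1 + start')
        = (if pvFindSeg t pat start' < 0 then -1
           else pvFindSeg t pat start' + ((seg.length + 1 : Nat) : Int)) := by
  have hlen : (seg ++ '/' :: t).length = seg.length + 1 + t.length := by simp; omega
  have main : ∀ (d start' : Nat), t.length + 1 - start' ≤ d →
      pvFindSeg (seg ++ '/' :: t) pat (seg.length + 1 + start')
        = (if pvFindSeg t pat start' < 0 then -1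
           else pvFindSeg t pat start' + ((seg.length + 1 : Nat) : Int)) := by
    intro d
    induction d with
    | zero =>
      intro start' hd
      have hT : pvFindSeg t pat start' = -1 := by
        rw [pvFindSeg]; rw [dif_neg (by omega)]
      rw [pvFindSeg, dif_neg (by omega), hT, if_pos (by norm_num)]
    | succ d ih =>
      intro start' hd
      by_cases hst : start' ≤ t.length
      · set jT := PySem.Chars.findFrom t pat (start' : Int) none with hjT
        by_cases hjn : 0 ≤ jT
        · have hspec := PySem.Chars.findFrom_natCast_spec t pat start' hst (by omega)
          rw [← hjT] at hspec
          have hocc := hspec.2.1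
          have hmin := hspec.2.2
          have hs1 : (start' : Int) ≤ jT := hspec.1
          have hjlt : jT.toNat < t.length := by
            have h1 := hocc.length_le
            have h2 : 1 ≤ pat.length := by
              cases pat with
              | nil => exact absurd rfl hpat
              | cons a b => simp
            rw [List.length_drop] at h1
            omega
          have hbig : PySem.Chars.findFrom (seg ++ '/' :: t) pat
              ((seg.length + 1 + start' : Nat) : Int) none
              = ((seg.length + 1 + jT.toNat : Nat) : Int) := by
            apply pv_findFromEq
            · omega
            · omega
            · rw [pv_drop_shift]; exact hocc
            · intro i hi1 hi2 hcon
              have heq : i = seg.length + 1 + (i - (seg.length + 1)) := by omega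
              rw [heq, pv_drop_shift] at hcon
              exact hmin (i - (seg.length + 1)) (by omega) (by omega) hcon
          -- boundary checks agree between the two strings
          have hbeq : (((seg.length + 1 + jT.toNat : Nat) : Int) = 0 ∨
              (seg ++ '/' :: t)[((seg.length + 1 + jT.toNat : Nat) : Int).toNat - 1]? = some '/')
              ↔ (jT = 0 ∨ t[jT.toNat - 1]? = some '/') := by
            constructor
            · intro h
              rcases h with h | h
              · exact absurd h (by omega)
              · by_cases hz : jT.toNat = 0
                · left; omega
                · right
                  rw [show ((seg.length + 1 + jT.toNat : Nat) : Int).toNat - 1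
                      = seg.length + 1 + (jT.toNat - 1) by omega] at h
                  rwa [pv_getElem_shift] at h
            · intro h
              right
              by_cases hz : jT = 0
              · rw [show ((seg.length + 1 + jT.toNat : Nat) : Int).toNat - 1
                    = seg.length by omega]
                rw [List.getElem?_append_right (le_refl _)]
                simp
              · rcases h with h | h
                · exact absurd h hz
                · rw [show ((seg.length + 1 + jT.toNat : Nat) : Int).toNat - 1
                      = seg.length + 1 + (jT.toNat - 1) by omega]
                  rwa [pv_getElem_shift]
          by_cases hbnd : jT = 0 ∨ t[jT.toNat - 1]? = some '/'
          · have hT : pvFindSeg t pat start' = jT := by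
              rw [pvFindSeg, ← hjT, dif_pos ⟨hjn, hst⟩, if_pos hbnd]
            rw [pvFindSeg, hbig, dif_pos ⟨by omega, by omega⟩, if_pos (hbeq.mpr hbnd), hT,
                if_neg (by omega)]
            push_cast
            omega
          · have hT : pvFindSeg t pat start' = pvFindSeg t pat (jT.toNat + 1) := by
              rw [pvFindSeg, ← hjT, dif_pos ⟨hjn, hst⟩, if_neg hbnd]
            rw [pvFindSeg, hbig, dif_pos ⟨by omega, by omega⟩,
                if_neg (fun hc => hbnd (hbeq.mp hc)), hT]
            rw [show ((seg.length + 1 + jT.toNat : Nat) : Int).toNat + 1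
                = seg.length + 1 + (jT.toNat + 1) by omega]
            exact ih (jT.toNat + 1) (by omega)
        · have hjeq : jT = -1 := by
            have := pv_findFrom_ge t pat start'
            omega
          have hnin : ¬ pat <:+: t.drop start' := by
            rw [← PySem.Chars.findFrom_natCast_eq_neg_one_iff t pat start' hst]
            exact hjeq
          have hbig : PySem.Chars.findFrom (seg ++ '/' :: t) pat
              ((seg.length + 1 + start' : Nat) : Int) none = -1 := by
            rw [PySem.Chars.findFrom_natCast_eq_neg_one_iff _ pat _ (by omega)]
            rw [pv_drop_shift]
            exact hnin
          have hT : pvFindSeg t pat start' = -1 := by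
            rw [pvFindSeg, ← hjT, dif_neg (by omega)]
          rw [pvFindSeg, hbig, dif_neg (by omega), hT, if_pos (by norm_num)]
      · have hT : pvFindSeg t pat start' = -1 := by
          rw [pvFindSeg]; rw [dif_neg (by omega)]
        rw [pvFindSeg, dif_neg (by omega), hT, if_pos (by norm_num)]
  intro start'
  exact main (t.length + 1 - start') start' (le_refl _)

lemma pv_K2 (kw seg t : List Char) (hkw : '/' ∉ kw) (hseg : '/' ∉ seg) (hne : kw ≠ seg) :
    pvFindSeg (seg ++ '/' :: t) (kw ++ ['/']) 0
      = (if pvFindSeg t (kw ++ ['/']) 0 < 0 then -1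
         else pvFindSeg t (kw ++ ['/']) 0 + ((seg.length + 1 : Nat) : Int)) := by
  have hlen : (seg ++ '/' :: t).length = seg.length + 1 + t.length := by simp; omega
  have climb : ∀ (d k : Nat), seg.length + 1 - k ≤ d → k ≤ seg.length + 1 →
      pvFindSeg (seg ++ '/' :: t) (kw ++ ['/']) k
        = pvFindSeg (seg ++ '/' :: t) (kw ++ ['/']) (seg.length + 1) := by
    intro d
    induction d with
    | zero => intro k h1 h2; rw [show k = seg.length + 1 by omega]
    | succ d ih =>
      intro k h1 h2
      by_cases hk : k = seg.length + 1
      · rw [hk]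
      · have hkm : k < seg.length + 1 := by omega
        rw [pv_skip _ _ k (by omega)]
        · exact ih (k + 1) (by omega) (by omega)
        · rintro ⟨hocc, hbnd⟩
          by_cases hk0 : k = 0
          · subst hk0
            rw [List.drop_zero] at hocc
            exact hne ((pv_prefix_boundary kw seg t hkw hseg).mp hocc)
          · rcases hbnd with hbnd | hbnd
            · exact hk0 hbnd
            have hklt : k - 1 < seg.length := by omega
            rw [List.getElem?_append_left hklt] at hbnd
            rw [List.getElem?_eq_getElem hklt] at hbnd
            have hc : seg[k - 1] = '/' := Option.some_inj.mp hbnd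
            exact hseg (hc ▸ List.getElem_mem hklt)
  have h0 := climb (seg.length + 1) 0 (by omega) (by omega)
  rw [h0, show seg.length + 1 = seg.length + 1 + 0 by omega,
      pv_shift seg t (kw ++ ['/']) (by simp) 0]

lemma pv_take_eq_takeWhile {α : Type} (p : α → Bool) : ∀ (l : List α) (d : Nat),
    (∀ (k : Nat) (_hk : k < d) (hl : k < l.length), p l[k] = true) →
    (∀ (hl : d < l.length), p (l[d]'(by omega)) = false) →
    l.take d = l.takeWhile p := by
  intro l
  induction l with
  | nil => intro d _ _; simp
  | cons x xs ih =>
    intro d h1 h2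
    cases d with
    | zero =>
      have := h2 (by simp)
      simp at this
      simp [List.takeWhile, this]
    | succ d =>
      have hx : p x = true := h1 0 (by omega) (by simp)
      rw [List.take_succ_cons, List.takeWhile_cons_of_pos hx]
      rw [ih d (fun k hk hl => h1 (k + 1) (by omega) (by simpa using hl))
        (fun hl => h2 (by simpa using hl))]

lemma pv_sing_prefix (l : List Char) (k : Nat) (hk : k < l.length) :
    ['/'] <+: l.drop k ↔ l[k] = '/' := by
  constructor
  · rintro ⟨u, hu⟩
    have : l.drop k = '/' :: u := hu.symm
    have h0 : (l.drop k)[0]? = some '/' := by rw [this]; rfl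
    rw [List.getElem?_drop] at h0
    simp at h0
    simpa [List.getElem?_eq_getElem hk] using h0
  · intro h
    refine ⟨l.drop (k + 1), ?_⟩
    rw [← h]
    exact (List.drop_eq_getElem_cons hk).symm

lemma pv_ident_eq (s : List Char) (i : Nat) (hi : i ≤ s.length) :
    (if PySem.Chars.findFrom s ['/'] (i : Int) none < 0 then
        PySem.List.slice s (some (i : Int)) none
      else PySem.List.slice s (some (i : Int)) (some (PySem.Chars.findFrom s ['/'] (i : Int) none)))
      = (s.drop i).takeWhile (· != '/') := by
  rw [PySem.Chars.findFrom_natCast s ['/'] i hi]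
  by_cases hf : PySem.Chars.find (s.drop i) ['/'] = -1
  · rw [if_pos (by rw [if_pos hf]; norm_num)]
    rw [PySem.List.slice_from_natCast]
    rw [List.takeWhile_eq_self_iff.mpr ?hmem]
    case hmem =>
      intro a ha
      have hnin := (PySem.Chars.find_eq_neg_one_iff _ _).mp hf
      by_cases hsl : a = '/'
      · subst hsl
        exfalso
        apply hnin
        rcases List.append_of_mem ha with ⟨u, v, huv⟩
        exact ⟨u, v, by rw [huv]; simp⟩
      · simpa [bne] using hsl
  · have hnn : 0 ≤ PySem.Chars.find (s.drop i) ['/'] := by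
      have := PySem.Chars.neg_one_le_find (s.drop i) ['/']
      omega
    set d := (PySem.Chars.find (s.drop i) ['/']).toNat with hd
    have hspec := PySem.Chars.find_spec hnn
    have hdlt : d < (s.drop i).length := by
      have h1 := hspec.1.length_le
      have h2 : ['/'].length = 1 := rfl
      by_cases hcase : d < (s.drop i).length
      · exact hcase
      · exfalso
        rw [List.drop_eq_nil_of_le (by omega)] at hspec
        exact absurd (List.prefix_nil.mp hspec.1) (by simp)
    rw [if_neg (by rw [if_neg hf]; omega)]
    rw [if_neg hf]
    have hcast : (i : Int) + PySem.Chars.find (s.drop i) ['/'] = ((i + d : Nat) : Int) := by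
      push_cast
      omega
    rw [hcast]
    rw [PySem.List.slice_natCast]
    rw [show i + d - i = d by omega]
    apply pv_take_eq_takeWhile
    · intro k hk hl
      have hnp : ¬ ['/'] <+: (s.drop i).drop k := hspec.2 k hk
      have := (not_congr (pv_sing_prefix (s.drop i) k hl)).mp hnp
      simpa [bne] using this
    · intro hl
      have hp : ['/'] <+: (s.drop i).drop d := hspec.1
      have := (pv_sing_prefix (s.drop i) d hl).mp hp
      simp [this]

-- ---------- the fold over the three keywords ----------

-- B's tail computation on the cleaned string (proof-side name for alt's body after the guard)
def pvBCore (s : List Char) : Option String × Option String :=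
  let st := pvPairs.foldl (pvBUpd s) (-1, none, 0)
  match st.2.1 with
  | none => (none, none)
  | some api =>
    let e := PySem.Chars.findFrom s ['/'] st.2.2 none
    let ident := if e < 0 then PySem.List.slice s (some st.2.2) none
                 else PySem.List.slice s (some st.2.2) (some e)
    (some (String.ofList api), some (String.ofList ident))

-- the shift relation between fold states over s = seg ++ '/' :: t and over t
def pvRel (m : Nat) (t : List Char) (stT stS : Int × Option (List Char) × Int) : Prop :=
  (stT = (-1, none, 0) ∧ stS = (-1, none, 0)) ∨
  (∃ (j : Int) (a : List Char) (i : Nat), 0 ≤ j ∧ i ≤ t.length ∧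
     stT = (j, some a, (i : Int)) ∧ stS = (j + (m : Nat), some a, ((i + m : Nat) : Int)))

lemma pv_fold_shift (seg t : List Char) (pairs : List (List Char × List Char))
    (hsh : ∀ p ∈ pairs,
      pvFindSeg (seg ++ '/' :: t) (p.1 ++ ['/']) 0
        = (if pvFindSeg t (p.1 ++ ['/']) 0 < 0 then -1
           else pvFindSeg t (p.1 ++ ['/']) 0 + (seg.length + 1 : Nat)))
    (stT stS : Int × Option (List Char) × Int) (hrel : pvRel (seg.length + 1) t stT stS) :
    pvRel (seg.length + 1) t (pairs.foldl (pvBUpd t) stT)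
      (pairs.foldl (pvBUpd (seg ++ '/' :: t)) stS) := by
  induction pairs generalizing stT stS with
  | nil => simpa using hrel
  | cons p ps ih =>
    rw [List.foldl_cons, List.foldl_cons]
    refine ih (fun q hq => hsh q (List.mem_cons_of_mem _ hq)) _ _ ?_
    have hp := hsh p (List.mem_cons_self ..)
    set rT := pvFindSeg t (p.1 ++ ['/']) 0 with hrT
    by_cases hr : 0 ≤ rT
    · have hspecT := pvFindSeg_spec t (p.1 ++ ['/']) 0 (by rw [← hrT] at *; exact hr)
      rw [← hrT] at hspecT
      have hilen : rT.toNat + (p.1.length + 1) ≤ t.length := by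
        have h1 := hspecT.length_le
        rw [List.length_drop, List.length_append] at h1
        simp at h1
        omega
      have hns : ¬ rT < 0 := by omega
      rcases hrel with ⟨hT, hS⟩ | ⟨j, a, i, hj, hi, hT, hS⟩
      · subst hT; subst hS
        unfold pvBUpd
        rw [← hrT, hp, if_neg hns]
        dsimp only
        rw [if_pos ⟨hr, Or.inl (by norm_num)⟩,
            if_pos ⟨by omega, Or.inl (by norm_num)⟩]
        right
        exact ⟨rT, p.2, rT.toNat + p.1.length + 1, hr, by omega,
          by simp only [Prod.mk.injEq, true_and]; omega,
          by simp only [Prod.mk.injEq, true_and]; omega⟩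
      · subst hT; subst hS
        unfold pvBUpd
        rw [← hrT, hp, if_neg hns]
        dsimp only
        by_cases hlt : rT < j
        · rw [if_pos ⟨hr, Or.inr hlt⟩,
              if_pos ⟨by omega, Or.inr (by omega)⟩]
          right
          exact ⟨rT, p.2, rT.toNat + p.1.length + 1, hr, by omega,
            by simp only [Prod.mk.injEq, true_and]; omega,
            by simp only [Prod.mk.injEq, true_and]; omega⟩
        · rw [if_neg (by rintro ⟨-, hc | hc⟩ <;> omega),
              if_neg (by rintro ⟨-, hc | hc⟩ <;> omega)]
          exact Or.inr ⟨j, a, i, hj, hi, rfl, rfl⟩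
    · have hns : rT < 0 := by omega
      rcases hrel with ⟨hT, hS⟩ | ⟨j, a, i, hj, hi, hT, hS⟩
      · subst hT; subst hS
        unfold pvBUpd
        rw [← hrT, hp, if_pos hns]
        dsimp only
        rw [if_neg (by rintro ⟨hc, -⟩; omega),
            if_neg (by rintro ⟨hc, -⟩; norm_num at hc)]
        exact Or.inl ⟨rfl, rfl⟩
      · subst hT; subst hS
        unfold pvBUpd
        rw [← hrT, hp, if_pos hns]
        dsimp only
        rw [if_neg (by rintro ⟨hc, -⟩; omega),
            if_neg (by rintro ⟨hc, -⟩; norm_num at hc)]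
        exact Or.inr ⟨j, a, i, hj, hi, rfl, rfl⟩

-- update lemmas for the three shapes a fold step takes
lemma pv_updA (s : List Char) (p : List Char × List Char)
    (st : Int × Option (List Char) × Int) (r : Int) (m : Nat) (hm : 1 ≤ m)
    (hj : pvFindSeg s (p.1 ++ ['/']) 0 = if r < 0 then -1 else r + (m : Int))
    (hP : st.1 = -1 ∨ 1 ≤ st.1) :
    (pvBUpd s st p).1 = -1 ∨ 1 ≤ (pvBUpd s st p).1 := by
  unfold pvBUpd
  rw [hj]
  dsimp only
  split_ifs with h h2 h2 <;> omega

lemma pv_updB (s : List Char) (p : List Char × List Char)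
    (st : Int × Option (List Char) × Int)
    (hj : pvFindSeg s (p.1 ++ ['/']) 0 = 0)
    (hP : st.1 = -1 ∨ 1 ≤ st.1) :
    pvBUpd s st p = (0, some p.2, ((p.1.length + 1 : Nat) : Int)) := by
  unfold pvBUpd
  rw [hj]
  dsimp only
  rw [if_pos ⟨le_refl 0, by omega⟩]
  simp only [Prod.mk.injEq, true_and]
  push_cast
  omega

lemma pv_updC (s : List Char) (p : List Char × List Char)
    (st : Int × Option (List Char) × Int) (r : Int) (m : Nat) (_hm : 1 ≤ m)
    (hj : pvFindSeg s (p.1 ++ ['/']) 0 = if r < 0 then -1 else r + (m : Int))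
    (hst : st.1 = 0) :
    pvBUpd s st p = st := by
  unfold pvBUpd
  rw [hj]
  dsimp only
  rw [if_neg ?hn]
  case hn =>
    rintro ⟨h1, h2 | h2⟩
    · omega
    · split_ifs at h1 h2 <;> omega

lemma pv_core_noslash (s : List Char) (h : '/' ∉ s) : pvBCore s = (none, none) := by
  have e1 := pv_noslash s ("playlist".toList ++ ['/']) (by simp) h
  have e2 := pv_noslash s ("show".toList ++ ['/']) (by simp) h
  have e3 := pv_noslash s ("track".toList ++ ['/']) (by simp) h
  have hskip : ∀ (p : List Char × List Char) (st : Int × Option (List Char) × Int),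
      pvFindSeg s (p.1 ++ ['/']) 0 = -1 → pvBUpd s st p = st := by
    intro p st he
    unfold pvBUpd
    rw [he]
    rw [if_neg (by rintro ⟨h1, -⟩; omega)]
  unfold pvBCore pvPairs
  rw [List.foldl_cons, List.foldl_cons, List.foldl_cons, List.foldl_nil]
  rw [hskip ("playlist".toList, "playlists".toList) _ e1,
      hskip ("show".toList, "shows".toList) _ e2,
      hskip ("track".toList, "tracks".toList) _ e3]

lemma pv_core_shift (seg t : List Char) (hseg : '/' ∉ seg) (hkind : pvKind seg = none) :
    pvBCore (seg ++ '/' :: t) = pvBCore t := by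
  have hne : ∀ kw : List Char, pvKind kw ≠ none → kw ≠ seg := by
    intro kw hkw he
    rw [he] at hkw
    exact hkw hkind
  have hsh : ∀ p ∈ pvPairs,
      pvFindSeg (seg ++ '/' :: t) (p.1 ++ ['/']) 0
        = (if pvFindSeg t (p.1 ++ ['/']) 0 < 0 then -1
           else pvFindSeg t (p.1 ++ ['/']) 0 + (seg.length + 1 : Nat)) := by
    intro p hp
    simp only [pvPairs, List.mem_cons, List.not_mem_nil, or_false] at hp
    rcases hp with rfl | rfl | rfl <;>
      exact pv_K2 _ seg t (by decide) hseg (hne _ (by decide))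
  have hfold := pv_fold_shift seg t pvPairs hsh (-1, none, 0) (-1, none, 0) (Or.inl ⟨rfl, rfl⟩)
  unfold pvBCore
  rcases hfold with ⟨hT, hS⟩ | ⟨j, a, i, hj, hi, hT, hS⟩
  · rw [hT, hS]
  · rw [hT, hS]
    dsimp only
    have hident2 := pv_ident_eq t i hi
    have hident := pv_ident_eq (seg ++ '/' :: t) (i + (seg.length + 1))
      (by simp; omega)
    rw [hident, hident2]
    rw [show i + (seg.length + 1) = seg.length + 1 + i by omega, pv_drop_shift]

lemma pv_core_match (seg t : List Char) (v : List Char) (hkind : pvKind seg = some v) :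
    pvBCore (seg ++ '/' :: t)
      = (some (String.ofList v), some (String.ofList (t.takeWhile (· != '/')))) := by
  unfold pvKind at hkind
  by_cases h1 : seg = "playlist".toList
  · rw [if_pos h1] at hkind
    have hv : v = "playlists".toList := (Option.some_inj.mp hkind).symm
    subst h1; subst hv
    have e1 : pvFindSeg ("playlist".toList ++ '/' :: t) ("playlist".toList ++ ['/']) 0 = 0 :=
      pv_K1 _ t
    have e2 := pv_K2 "show".toList "playlist".toList t (by decide) (by decide) (by decide)
    have e3 := pv_K2 "track".toList "playlist".toList t (by decide) (by decide) (by decide)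
    unfold pvBCore pvPairs
    rw [List.foldl_cons, List.foldl_cons, List.foldl_cons, List.foldl_nil]
    rw [pv_updB _ ("playlist".toList, "playlists".toList) _ e1 (Or.inl rfl)]
    rw [pv_updC _ ("show".toList, "shows".toList) _ _ _ (by omega) e2 rfl]
    rw [pv_updC _ ("track".toList, "tracks".toList) _ _ _ (by omega) e3 rfl]
    dsimp only
    rw [pv_ident_eq _ ("playlist".toList.length + 1) (by simp)]
    rw [pv_drop_shift0]
  · by_cases h2 : seg = "show".toList
    · rw [if_neg h1, if_pos h2] at hkind
      have hv : v = "shows".toList := (Option.some_inj.mp hkind).symm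
      subst h2; subst hv
      have e1 := pv_K2 "playlist".toList "show".toList t (by decide) (by decide) (by decide)
      have e2 : pvFindSeg ("show".toList ++ '/' :: t) ("show".toList ++ ['/']) 0 = 0 :=
        pv_K1 _ t
      have e3 := pv_K2 "track".toList "show".toList t (by decide) (by decide) (by decide)
      unfold pvBCore pvPairs
      rw [List.foldl_cons, List.foldl_cons, List.foldl_cons, List.foldl_nil]
      have s1 := pv_updA _ ("playlist".toList, "playlists".toList) (-1, none, 0) _ _
        (by omega) e1 (Or.inl rfl)
      rw [pv_updB _ ("show".toList, "shows".toList) _ e2 s1]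
      rw [pv_updC _ ("track".toList, "tracks".toList) _ _ _ (by omega) e3 rfl]
      dsimp only
      rw [pv_ident_eq _ ("show".toList.length + 1) (by simp)]
      rw [pv_drop_shift0]
    · by_cases h3 : seg = "track".toList
      · rw [if_neg h1, if_neg h2, if_pos h3] at hkind
        have hv : v = "tracks".toList := (Option.some_inj.mp hkind).symm
        subst h3; subst hv
        have e1 := pv_K2 "playlist".toList "track".toList t (by decide) (by decide) (by decide)
        have e2 := pv_K2 "show".toList "track".toList t (by decide) (by decide) (by decide)
        have e3 : pvFindSeg ("track".toList ++ '/' :: t) ("track".toList ++ ['/']) 0 = 0 :=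
          pv_K1 _ t
        unfold pvBCore pvPairs
        rw [List.foldl_cons, List.foldl_cons, List.foldl_cons, List.foldl_nil]
        have s1 := pv_updA _ ("playlist".toList, "playlists".toList) (-1, none, 0) _ _
          (by omega) e1 (Or.inl rfl)
        have s2 := pv_updA _ ("show".toList, "shows".toList) _ _ _ (by omega) e2 s1
        rw [pv_updB _ ("track".toList, "tracks".toList) _ e3 s2]
        dsimp only
        rw [pv_ident_eq _ ("track".toList.length + 1) (by simp)]
        rw [pv_drop_shift0]
      · rw [if_neg h1, if_neg h2, if_neg h3] at hkind
        exact absurd hkind (by simp)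

-- ---------- main: B's positional computation equals the segment walk ----------

lemma pv_main : ∀ (n : Nat) (s : List Char), s.length ≤ n →
    pvBCore s = pvBScan (pvSplit s) := by
  intro n
  induction n with
  | zero =>
    intro s hs
    have hnil : s = [] := by cases s with | nil => rfl | cons a b => simp at hs
    subst hnil
    rw [pv_core_noslash [] (by simp), pvSplit_no_slash [] (by simp)]
    rfl
  | succ n ih =>
    intro s hs
    by_cases hslash : '/' ∈ s
    · have hsplit := List.takeWhile_append_dropWhile (p := (· != '/')) (l := s)
      have hrest_ne : s.dropWhile (· != '/') ≠ [] := by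
        intro h0
        have hall := List.dropWhile_eq_nil_iff.mp h0
        have := hall '/' hslash
        simp at this
      have hhead : (s.dropWhile (· != '/')).head hrest_ne = '/' := by
        have := List.head_dropWhile_not (p := (· != '/')) hrest_ne
        simpa using this
      have hrest : s.dropWhile (· != '/') = '/' :: (s.dropWhile (· != '/')).tail := by
        have h1 := (List.cons_head_tail hrest_ne).symm
        rw [hhead] at h1
        exact h1
      set seg := s.takeWhile (· != '/') with hseg_def
      set t := (s.dropWhile (· != '/')).tail with ht_def
      have hdecomp : s = seg ++ '/' :: t := by
        conv_lhs => rw [← hsplit]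
        rw [hrest]
      have hsegns : '/' ∉ seg := by
        intro hm
        have := List.mem_takeWhile_imp hm
        simp at this
      have hlen : t.length ≤ n := by
        have := congrArg List.length hdecomp
        simp at this
        omega
      rw [hdecomp, pvSplit_append _ _ hsegns]
      cases hkind : pvKind seg with
      | none =>
        rw [pv_core_shift seg t hsegns hkind]
        rw [ih t hlen]
        cases hsp : pvSplit t with
        | nil => exact absurd hsp (pvSplit_ne_nil _)
        | cons q r => simp [pvBScan, hkind]
      | some v =>
        rw [pv_core_match seg t v hkind]
        cases hsp : pvSplit t with
        | nil => exact absurd hsp (pvSplit_ne_nil _)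
        | cons q r =>
          have hq : q = t.takeWhile (· != '/') := by
            have hh := pvSplit_head t
            rw [hsp] at hh
            simpa using hh
          simp [pvBScan, hkind, hq]
    · rw [pv_core_noslash s hslash, pvSplit_no_slash s hslash]
      rfl


-- ===== VERDICT (by name: the statement is the Claim_ definition above) =====
theorem extract_type_and_id_py_spec : Claim_equal_extract_type_and_id_py := by
  intro url _
  show extract_type_and_id_py url = extract_type_and_id_py_alt url
  unfold extract_type_and_id_py extract_type_and_id_py_alt
  by_cases hg : PySem.Str.isIn "spotify.com" url = false
  · rw [if_pos hg, if_pos hg]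
  · rw [if_neg hg, if_neg hg]
    set s := PySem.Chars.stripChars
      ((PySem.Chars.splitOn ((PySem.Chars.splitOn url.toList ['?']).headD []) ['#']).headD [])
      ['/'] with hsdef
    show pvAScan (PySem.Chars.splitOn s ['/'])
        (PySem.List.enumerate (PySem.Chars.splitOn s ['/'])) = pvBCore s
    rw [pv_splitOn_eq]
    calc pvAScan (pvSplit s) (PySem.List.enumerate (pvSplit s))
        = pvBScan (pvSplit s) := pv_scan_eq (pvSplit s) (pvSplit s) 0 rfl
      _ = pvBCore s := (pv_main s.length s (le_refl _)).symm
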